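-- pv_equiv track=rewrite | github.com/HoaLe69/DSA2025_MOOC_PI | efficient_algorithms/list_spliting.py | count_splits2
-- ===== SOURCE A (Python) =====
-- def count_splits2(numbers):
--     count = 0
--     n = len(numbers)
--     left_sum = 0
--     total_sum = sum(numbers)
--     for i in range(n - 1):
--         left_sum += numbers[i]
--         right_sum = total_sum - left_sum
--
--         if left_sum == right_sum:
--             count += 1
--     return count
-- ===== SOURCE B (Python) =====
-- def count_splits2(numbers):
--     # Build the left-sum table (forward pass, no total needed).
--     lefts = []
--     acc = 0
--     for x in numbers[:-1]:
--         acc += x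
--         lefts.append(acc)
--     # Build the right-sum table by a backward pass over the tail.
--     rights = []
--     acc = 0
--     for x in reversed(numbers[1:]):
--         acc += x
--         rights.append(acc)
--     rights.reverse()
--     # Compare the two tables positionally.
--     count = 0
--     for l, r in zip(lefts, rights):
--         if l == r:
--             count += 1
--     return count
-- ===== Notes on version B (the rewrite author's own statement) =====
-- stated objective: alternative
-- what changed: B never computes the total sum: it builds a left-sum table by a forward pass and a right-sum table by a backward pass over the tail, then counts positions where the two tables agree, replacing A's single streaming loop that derives right_sum from a precomputed total.
import Mathlib
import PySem

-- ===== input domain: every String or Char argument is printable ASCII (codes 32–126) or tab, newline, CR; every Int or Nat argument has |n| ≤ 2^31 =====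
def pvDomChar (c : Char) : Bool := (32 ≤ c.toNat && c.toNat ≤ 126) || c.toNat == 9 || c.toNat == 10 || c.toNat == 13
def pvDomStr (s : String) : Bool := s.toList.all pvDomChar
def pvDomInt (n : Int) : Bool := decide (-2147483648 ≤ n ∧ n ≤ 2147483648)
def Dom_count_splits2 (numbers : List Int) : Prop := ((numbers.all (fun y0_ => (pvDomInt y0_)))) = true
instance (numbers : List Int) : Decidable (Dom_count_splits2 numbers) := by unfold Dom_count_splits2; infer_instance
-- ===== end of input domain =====

-- B never computes the total sum: it builds a left-sum table forward and a right-sum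
-- table backward over the tail, then counts positions where the tables agree
-- (alternative algorithm, same cost as A's total-based streaming loop).

-- ===== PORT A =====
def count_splits2 (numbers : List Int) : Int :=
  let n : Int := numbers.length
  let total_sum : Int := numbers.foldl (· + ·) 0
  -- state = (count, left_sum)
  let st := (PySem.List.pyRange 0 (n - 1) 1).foldl
    (fun (st : Int × Int) i =>
      let left_sum := st.2 + PySem.List.pyGetD numbers i 0
      let right_sum := total_sum - left_sum
      (if left_sum = right_sum then st.1 + 1 else st.1, left_sum))
    (0, 0)
  st.1

-- ===== PORT B =====
def count_splits2_alt (numbers : List Int) : Int :=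
  -- lefts: forward pass over numbers[:-1] appending running sums
  let lefts := ((PySem.List.slice numbers none (some (-1))).foldl
    (fun (acc : List Int × Int) x => (acc.1 ++ [acc.2 + x], acc.2 + x))
    (([] : List Int), (0 : Int))).1
  -- rights: backward pass over reversed(numbers[1:]), then reversed back
  let rights0 := (((PySem.List.slice numbers (some 1) none).reverse).foldl
    (fun (acc : List Int × Int) x => (acc.1 ++ [acc.2 + x], acc.2 + x))
    (([] : List Int), (0 : Int))).1
  let rights := rights0.reverse
  -- compare the two tables positionally
  (lefts.zip rights).foldl (fun (c : Int) p => if p.1 = p.2 then c + 1 else c) 0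

-- ===== PRECONDITION & SPEC =====
def Spec_count_splits2 (numbers : List Int) (out : Int) : Prop := out = count_splits2_alt numbers
instance (numbers : List Int) (out : Int) : Decidable (Spec_count_splits2 numbers out) := by unfold Spec_count_splits2; infer_instance

-- ===== CLAIM (what is proved, stated in full; the proofs are below) =====
def Claim_equal_count_splits2 : Prop := ∀ (numbers : List Int), Dom_count_splits2 numbers → Spec_count_splits2 numbers (count_splits2 numbers)

-- ===== LEMMAS AND PROOFS =====

/-- Running prefix sums starting from accumulator `s`. -/
def pfx (s : Int) : List Int → List Int
  | [] => []
  | x :: xs => (s + x) :: pfx (s + x) xs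

theorem pfx_length (s : Int) (xs : List Int) : (pfx s xs).length = xs.length := by
  induction xs generalizing s with
  | nil => rfl
  | cons x xs ih => simp [pfx, ih]

theorem b_prefix (xs : List Int) (l : List Int) (s : Int) :
    (xs.foldl (fun (acc : List Int × Int) x => (acc.1 ++ [acc.2 + x], acc.2 + x)) (l, s)).1
      = l ++ pfx s xs := by
  induction xs generalizing l s with
  | nil => simp [pfx]
  | cons x xs ih => simp [pfx, ih]

theorem pfx_getElem (s : Int) (xs : List Int) (i : Nat) (h : i < xs.length) :
    (pfx s xs)[i]'(by rw [pfx_length]; exact h) = s + (xs.take (i + 1)).sum := by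
  induction xs generalizing s i with
  | nil => simp at h
  | cons x xs ih =>
    cases i with
    | zero => simp [pfx]
    | succ j =>
      have hj : j < xs.length := by simpa using h
      simp only [pfx, List.getElem_cons_succ, List.take_succ_cons, List.sum_cons]
      rw [ih (s + x) j hj]; ring

theorem sum_drop_eq (l : List Int) (k : Nat) :
    (l.drop k).sum = l.sum - (l.take k).sum := by
  have := List.sum_take_add_sum_drop l k
  omega

/-- The reversed backward table equals the left table mapped through `total - ·`. -/
theorem rights_eq (l : List Int) :
    (pfx 0 l.tail.reverse).reverse = (pfx 0 l.dropLast).map (fun x => l.sum - x) := by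
  apply List.ext_getElem
  · simp [pfx_length]
  · intro i h1 h2
    have hlen : i < l.length - 1 := by
      simpa [pfx_length] using h2
    have hrevlen : (pfx 0 l.tail.reverse).length = l.length - 1 := by
      simp [pfx_length]
    rw [List.getElem_reverse]
    rw [List.getElem_map]
    have hk : (pfx 0 l.tail.reverse).length - 1 - i < l.tail.reverse.length := by
      simp [pfx_length]; omega
    rw [pfx_getElem 0 l.tail.reverse _ hk]
    rw [pfx_getElem 0 l.dropLast i (by simpa using hlen)]
    -- take on reverse becomes drop, modulo a reverse that the sum ignores
    have htr : l.tail.reverse.take ((pfx 0 l.tail.reverse).length - 1 - i + 1)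
        = (l.tail.drop (l.tail.length - ((pfx 0 l.tail.reverse).length - 1 - i + 1))).reverse := by
      rw [List.take_reverse]
    rw [htr, List.sum_reverse]
    have hidx : l.tail.length - ((pfx 0 l.tail.reverse).length - 1 - i + 1) = i := by
      simp [pfx_length, List.length_tail] at *; omega
    rw [hidx]
    have hdt : l.tail.drop i = l.drop (i + 1) := by
      rw [← List.drop_one, List.drop_drop, Nat.add_comm]
    have hdl : l.dropLast.take (i + 1) = l.take (i + 1) := by
      rw [List.dropLast_eq_take, List.take_take]
      congr 1
      omega
    rw [hdt, hdl, sum_drop_eq]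
    ring

/-- Counting equal pairs against `map (t - ·)` is counting `2·x = t`. -/
theorem zip_map_fold (l : List Int) (t : Int) (c : Int) :
    (l.zip (l.map (fun x => t - x))).foldl
        (fun (c : Int) p => if p.1 = p.2 then c + 1 else c) c
      = l.foldl (fun (c : Int) p => if 2 * p = t then c + 1 else c) c := by
  induction l generalizing c with
  | nil => rfl
  | cons x xs ih =>
    simp only [List.map_cons, List.zip_cons_cons, List.foldl_cons]
    have h : (x = t - x) ↔ (2 * x = t) := by omega
    rw [if_congr h rfl rfl, ih]

theorem foldl_add_eq (l : List Int) (s : Int) : l.foldl (· + ·) s = s + l.sum := by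
  induction l generalizing s with
  | nil => simp
  | cons x xs ih => simp [ih]; ring

theorem a_fold (t : Int) (xs : List Int) (c l : Int) :
    (xs.foldl (fun (st : Int × Int) x =>
        (if st.2 + x = t - (st.2 + x) then st.1 + 1 else st.1, st.2 + x)) (c, l)).1
      = (pfx l xs).foldl (fun c p => if 2 * p = t then c + 1 else c) c := by
  induction xs generalizing c l with
  | nil => rfl
  | cons x xs ih =>
    simp only [List.foldl_cons, pfx]
    have h : (l + x = t - (l + x)) ↔ (2 * (l + x) = t) := by omega
    rw [ih, if_congr h rfl rfl]

theorem fold_dropLast (xs : List Int) (t : Int) :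
    List.foldl (fun (st : Int × Int) i =>
      (if st.2 + PySem.List.pyGetD xs i 0 = t - (st.2 + PySem.List.pyGetD xs i 0)
        then st.1 + 1 else st.1,
       st.2 + PySem.List.pyGetD xs i 0)) (0, 0)
      (PySem.List.pyRange 0 (xs.dropLast.length : Int))
    = List.foldl (fun (st : Int × Int) x =>
        (if st.2 + x = t - (st.2 + x) then st.1 + 1 else st.1, st.2 + x)) (0, 0) xs.dropLast := by
  rw [PySem.List.foldl_congr_mem _ _
    (fun (st : Int × Int) i =>
      (if st.2 + PySem.List.pyGetD xs.dropLast i 0 = t - (st.2 + PySem.List.pyGetD xs.dropLast i 0)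
        then st.1 + 1 else st.1,
       st.2 + PySem.List.pyGetD xs.dropLast i 0)) _
    (by
      intro acc x hx
      have hmem := (PySem.List.mem_pyRange_one).1 hx
      have h1 : x.toNat < xs.dropLast.length := by omega
      have h2 : x.toNat < xs.length := by
        have hL := List.length_dropLast (xs := xs)
        omega
      have hget : PySem.List.pyGetD xs x 0 = PySem.List.pyGetD xs.dropLast x 0 := by
        rw [PySem.List.pyGetD_eq_getElem _ _ hmem.1 (by omega),
            PySem.List.pyGetD_eq_getElem _ _ hmem.1 (by omega)]
        simp [List.getElem_dropLast]
      simp only [hget])]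
  exact PySem.List.foldl_pyRange_zero_pyGetD' xs.dropLast 0
    (fun (st : Int × Int) x =>
      (if st.2 + x = t - (st.2 + x) then st.1 + 1 else st.1, st.2 + x)) (0, 0)

-- ===== VERDICT (by name: the statement is the Claim_ definition above) =====
theorem count_splits2_spec : Claim_equal_count_splits2 := by
  intro numbers _
  unfold Spec_count_splits2 count_splits2 count_splits2_alt
  simp only [PySem.List.slice_to_neg_one, PySem.List.slice_from_one,
    b_prefix, List.nil_append, rights_eq, zip_map_fold]
  rw [foldl_add_eq, zero_add]
  cases numbers with
  | nil => rfl
  | cons a as =>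
    have hlen : ((a :: as).length : Int) - 1 = ((a :: as).dropLast.length : Int) := by simp
    rw [hlen, fold_dropLast, a_fold]
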